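-- pv_equiv track=rewrite | github.com/Sergio-Daniel-Pires/materias-faculdade | mc102/tarefa05/modulo_analise.py | histograma
-- ===== SOURCE A (Python) =====
-- def comparar(mins, valores, maxs):
--     vezes = 0
--     for i in valores:
--         if mins <= i < maxs:
--             vezes += 1
--     return vezes
--     """
--     Pro programa não ficar com muitas linhas repetidas
--     pq eu precisava criar um laço com while/for eu criei
--     outra função que faz o trabalho de comparar todos os
--     valores de uma lista (valores) com os intervalos (mins e maxs)
--     e fiquei repetindo ela
--     """
--
-- def histograma(valores, intervalos):
--     histograma = []
--     atual = 1
--     maxx = len(intervalos)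
--     while atual < maxx:
--         mins = intervalos[atual-1]
--         maxs = intervalos[atual]
--         histograma.append(comparar(mins, valores, maxs))
--         atual += 1
--     return histograma
--
--     """
--     Cria uma lista com as frequências do histograma de 'valores', divididas nas
--     classes conforme a lista 'intervalos'. Por exemplo, se temos [10, 20, 30]
--     como intervalos, devemos obter as frequências dos intervalos [10, 20) e [20,
--     30).
--
--     Parâmetros: listas de números.
--     Retorna: lista de frequência do histograma.
--     """
-- ===== SOURCE B (Python) =====
-- def histograma(valores, intervalos):
--     # Sort the values once; then each bin [a, b) is the difference of two
--     # binary-searched prefix counts: #(v < b) - #(v < a)  (0 if a > b).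
--     ordenados = sorted(valores)
--     n = len(ordenados)
--
--     def menores_que(x):
--         # bisect_left: number of sorted values strictly below x
--         lo, hi = 0, n
--         while lo < hi:
--             meio = (lo + hi) // 2
--             if ordenados[meio] < x:
--                 lo = meio + 1
--             else:
--                 hi = meio
--         return lo
--
--     resultado = []
--     for a, b in zip(intervalos, intervalos[1:]):
--         resultado.append(menores_que(b) - menores_que(a) if a <= b else 0)
--     return resultado
-- ===== Notes on version B (the rewrite author's own statement) =====
-- stated objective: faster
-- what changed: B sorts the values once and computes each bin count as the difference of two binary-searched prefix counts (bisect_left), instead of A's full scan of all values for every interval.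
import Mathlib
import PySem

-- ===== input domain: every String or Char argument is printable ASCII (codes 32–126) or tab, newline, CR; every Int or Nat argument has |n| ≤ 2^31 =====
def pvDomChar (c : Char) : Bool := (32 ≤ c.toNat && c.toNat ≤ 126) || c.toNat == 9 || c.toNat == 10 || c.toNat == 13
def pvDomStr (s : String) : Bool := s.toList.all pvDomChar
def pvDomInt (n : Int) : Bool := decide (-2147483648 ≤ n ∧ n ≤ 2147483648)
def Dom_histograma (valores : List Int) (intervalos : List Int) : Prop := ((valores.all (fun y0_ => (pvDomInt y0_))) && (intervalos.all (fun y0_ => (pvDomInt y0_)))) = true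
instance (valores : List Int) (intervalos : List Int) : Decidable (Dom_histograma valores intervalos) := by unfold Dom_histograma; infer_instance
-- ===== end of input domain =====

-- B replaces A's per-bin scan of all values by one sort plus binary-searched prefix counts (timed faster by the check).

-- ===== PORT A =====
-- helper 'comparar': counts values i with mins <= i < maxs
def comparar (mins : Int) (valores : List Int) (maxs : Int) : Int :=
  valores.foldl (fun vezes i => if mins ≤ i ∧ i < maxs then vezes + 1 else vezes) 0

-- while 'atual < maxx' with atual starting at 1 and stepping by 1 = for atual in range(1, maxx);
-- intervalos[atual-1] / intervalos[atual] are always in range there (1 ≤ atual < len), so pyGetD is exact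
def histograma (valores : List Int) (intervalos : List Int) : List Int :=
  let maxx : Int := intervalos.length
  (PySem.List.pyRange 1 maxx 1).foldl
    (fun hist atual =>
      hist ++ [comparar (PySem.List.pyGetD intervalos (atual - 1) 0) valores
                        (PySem.List.pyGetD intervalos atual 0)]) []

-- ===== PORT B =====
-- Source B's hand-written 'menores_que' loop is exactly bisect_left's loop
-- (lo/hi, meio = (lo+hi)//2, strict '<'), so it is ported as PySem.List.bisectLeft.
def menoresQue (ordenados : List Int) (x : Int) : Int :=
  (PySem.List.bisectLeft ordenados x : Int)

-- zip(intervalos, intervalos[1:]) = intervalos.zip intervalos.tail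
def histograma_alt (valores : List Int) (intervalos : List Int) : List Int :=
  let ordenados := PySem.List.sorted valores (fun v => v) false
  (intervalos.zip intervalos.tail).foldl
    (fun resultado ab =>
      resultado ++ [if ab.1 ≤ ab.2 then menoresQue ordenados ab.2 - menoresQue ordenados ab.1 else 0]) []

-- ===== PRECONDITION & SPEC =====
def Spec_histograma (valores : List Int) (intervalos : List Int) (out : List Int) : Prop := out = histograma_alt valores intervalos
instance (valores : List Int) (intervalos : List Int) (out : List Int) : Decidable (Spec_histograma valores intervalos out) := by unfold Spec_histograma; infer_instance

-- ===== CLAIM (what is proved, stated in full; the proofs are below) =====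
def Claim_equal_histograma : Prop := ∀ (valores : List Int) (intervalos : List Int), Dom_histograma valores intervalos → Spec_histograma valores intervalos (histograma valores intervalos)

-- ===== LEMMAS AND PROOFS =====

-- counting values below b splits at a (for a ≤ b)
theorem countP_split (a b : Int) (l : List Int) (hab : a ≤ b) :
    l.countP (fun v => decide (v < b))
      = l.countP (fun v => decide (v < a)) + l.countP (fun i => decide (a ≤ i ∧ i < b)) := by
  induction l with
  | nil => simp
  | cons x t ih =>
    simp only [List.countP_cons, ih, decide_eq_true_eq]
    split_ifs <;> omega

-- an empty interval counts nothing
theorem countP_interval_zero (valores : List Int) (a b : Int) (hab : ¬ a ≤ b) :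
    (valores.countP (fun i => decide (a ≤ i ∧ i < b)) : Int) = 0 := by
  have : valores.countP (fun i => decide (a ≤ i ∧ i < b)) = 0 := by
    rw [List.countP_eq_zero]
    intro x hx
    simp only [decide_eq_true_eq]
    intro h; omega
  exact_mod_cast this

-- bisect_left on a sorted list counts the elements strictly below x
theorem bisect_counts (s : List Int) (hs : s.Pairwise (· ≤ ·)) (x : Int) :
    PySem.List.bisectLeft s x = s.countP (fun v => decide (v < x)) := by
  obtain ⟨hk, h1, h2⟩ := PySem.List.bisectLeft_spec s x hs
  set k := PySem.List.bisectLeft s x with hkdef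
  have htake : (s.take k).countP (fun v => decide (v < x)) = k := by
    rw [List.countP_eq_length.mpr]
    · simp [List.length_take]; omega
    · intro y hy
      obtain ⟨j, hj, rfl⟩ := List.mem_iff_getElem.mp hy
      have hjk : j < k := lt_of_lt_of_le hj (by simp)
      have := h1 j (lt_of_lt_of_le hjk hk) hjk
      simp [List.getElem_take] at *
      omega
  have hdrop : (s.drop k).countP (fun v => decide (v < x)) = 0 := by
    rw [List.countP_eq_zero]
    intro y hy
    obtain ⟨j, hj, rfl⟩ := List.mem_iff_getElem.mp hy
    have hlen : k + j < s.length := by simp [List.length_drop] at hj; omega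
    have := h2 (k + j) (by omega) (Nat.le_add_right _ _)
    simp [List.getElem_drop] at *
    omega
  have := List.countP_append (l₁ := s.take k) (l₂ := s.drop k) (p := fun v => decide (v < x))
  rw [List.take_append_drop] at this
  omega

-- A's helper is a count
theorem comparar_eq_countP (mins maxs : Int) (valores : List Int) :
    comparar mins valores maxs = (valores.countP (fun i => decide (mins ≤ i ∧ i < maxs)) : Int) := by
  unfold comparar
  simpa using PySem.List.foldl_ite_add_one (fun i => mins ≤ i ∧ i < maxs) valores 0

-- B's binary search counts the original values strictly below x
theorem menoresQue_eq_countP (valores : List Int) (x : Int) :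
    menoresQue (PySem.List.sorted valores (fun v => v) false) x
      = (valores.countP (fun v => decide (v < x)) : Int) := by
  unfold menoresQue
  rw [bisect_counts _ (PySem.List.sorted_pairwise valores (fun v => v)) x,
    (PySem.List.sorted_perm valores (fun v => v) false).countP_eq]

-- one bin of A equals one bin of B
theorem bin_eq (valores : List Int) (a b : Int) :
    comparar a valores b
      = if a ≤ b then
          menoresQue (PySem.List.sorted valores (fun v => v) false) b
            - menoresQue (PySem.List.sorted valores (fun v => v) false) a
        else 0 := by
  rw [comparar_eq_countP]
  by_cases hab : a ≤ b
  · rw [if_pos hab, menoresQue_eq_countP, menoresQue_eq_countP]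
    have := countP_split a b valores hab
    omega
  · rw [if_neg hab, countP_interval_zero valores a b hab]

theorem histograma_eq_alt (valores : List Int) (intervalos : List Int) :
    histograma valores intervalos = histograma_alt valores intervalos := by
  unfold histograma histograma_alt
  rw [PySem.List.foldl_append_singleton_eq_map, PySem.List.foldl_append_singleton_eq_map]
  simp only [List.nil_append]
  apply List.ext_getElem
  · simp [PySem.List.length_pyRange_one, List.length_tail]
  · intro i h1 h2
    simp only [List.getElem_map, PySem.List.getElem_pyRange_one, List.getElem_zip]
    have hlen : i + 1 < intervalos.length := by
      simp [PySem.List.length_pyRange_one] at h1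
      omega
    have e1 : PySem.List.pyGetD intervalos (1 + (i : Int) - 1) 0 = intervalos[i] := by
      rw [show (1 + (i : Int) - 1) = (i : Int) by ring,
        PySem.List.pyGetD_eq_getElem intervalos 0 (by positivity) (by exact_mod_cast Nat.lt_of_succ_lt hlen)]
      simp
    have e2 : PySem.List.pyGetD intervalos (1 + (i : Int)) 0 = intervalos[i + 1] := by
      rw [show (1 + (i : Int)) = ((i + 1 : Nat) : Int) by push_cast; ring,
        PySem.List.pyGetD_eq_getElem intervalos 0 (by positivity) (by exact_mod_cast hlen)]
      simp
    rw [e1, e2, bin_eq]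
    simp [List.getElem_tail]

-- ===== VERDICT (by name: the statement is the Claim_ definition above) =====
theorem histograma_spec : Claim_equal_histograma := by
  intro valores intervalos _
  exact histograma_eq_alt valores intervalos
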